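-- pv_equiv track=rewrite | github.com/moonmd/SCPI_Bench | drivers/ams/ens210_serial.py | _crc7
-- ===== SOURCE A (Python) =====
-- def _crc7(val: int) -> int:
--     CRC7POLY=0x89; CRC7WIDTH=7; CRC7IVEC=0x7F; DATA7WIDTH=17
--     pol = CRC7POLY << (DATA7WIDTH - CRC7WIDTH - 1)
--     bit = 1 << (DATA7WIDTH - 1)
--     v = (val << CRC7WIDTH); pol <<= CRC7WIDTH; v |= CRC7IVEC
--     while bit >= 1:
--         if (v & (bit << CRC7WIDTH)): v ^= pol
--         bit >>= 1; pol >>= 1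
--     return v & ((1<<CRC7WIDTH)-1)
-- ===== SOURCE B (Python) =====
-- def _crc7(val: int) -> int:
--     # MSB-first CRC shift register over the seventeen data bits, then the seven
--     # appended init-vector bits (0x7F = seven ones); reduced poly 0x09.
--     crc = 0
--     for i in range(16, -1, -1):
--         top = crc & 0x40
--         crc = ((crc << 1) & 0x7F) | ((val >> i) & 1)
--         if top:
--             crc ^= 0x09
--     for _ in range(7):
--         top = crc & 0x40
--         crc = ((crc << 1) & 0x7F) | 1
--         if top:
--             crc ^= 0x09
--     return crc
-- ===== Notes on version B (the rewrite author's own statement) =====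
-- stated objective: alternative
-- what changed: A divides the wide augmented value in place, sliding a shifted-up polynomial and bit mask down over it; B keeps only a seven-bit CRC shift register and feeds it the seventeen data bits MSB-first followed by the seven appended init-vector bits, XORing the reduced polynomial 0x09 whenever the bit shifted out of the top of the register is set.
import Mathlib
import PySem

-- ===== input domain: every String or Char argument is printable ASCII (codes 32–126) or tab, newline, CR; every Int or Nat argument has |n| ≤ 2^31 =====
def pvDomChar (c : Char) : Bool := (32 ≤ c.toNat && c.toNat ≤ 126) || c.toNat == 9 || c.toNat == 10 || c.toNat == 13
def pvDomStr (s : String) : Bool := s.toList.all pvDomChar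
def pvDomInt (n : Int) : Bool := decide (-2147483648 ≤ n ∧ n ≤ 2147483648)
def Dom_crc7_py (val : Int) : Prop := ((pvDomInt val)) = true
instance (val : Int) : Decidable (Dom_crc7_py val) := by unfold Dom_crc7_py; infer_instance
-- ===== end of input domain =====

-- B replaces A's wide value with sliding polynomial/bit masks by a seven-bit
-- MSB-first CRC shift register fed the seventeen data bits and then the seven
-- appended init-vector bits (alternative decomposition, same cost).

-- ===== PORT A =====
-- the while loop: bit starts at 2^16 and halves each pass, so it runs exactly
-- seventeen times; the fuel argument only makes the recursion structural, the
-- `1 ≤ bit` guard is Python's loop condition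
def crc7Loop : Nat → Int → Int → Int → Int
  | 0, v, _, _ => v
  | n+1, v, pol, bit =>
    if 1 ≤ bit then
      crc7Loop n (if PySem.Int.band v (bit <<< (7:Nat)) ≠ 0 then PySem.Int.bxor v pol else v)
        (pol >>> (1:Nat)) (bit >>> (1:Nat))
    else v

def crc7_py (val : Int) : Int :=
  let pol : Int := (0x89 : Int) <<< (17 - 7 - 1 : Nat)
  let bit : Int := (1 : Int) <<< (17 - 1 : Nat)
  let v : Int := val <<< (7:Nat)
  let pol : Int := pol <<< (7:Nat)
  let v : Int := PySem.Int.bor v 0x7F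
  let v : Int := crc7Loop 17 v pol bit
  PySem.Int.band v ((1 <<< (7:Nat)) - 1)

-- ===== PORT B =====
def bStep (crc b : Int) : Int :=
  let top := PySem.Int.band crc 0x40
  let crc := PySem.Int.bor (PySem.Int.band (crc <<< (1:Nat)) 0x7F) b
  if top ≠ 0 then PySem.Int.bxor crc 0x09 else crc

def crc7_py_alt (val : Int) : Int :=
  let crc := (PySem.List.pyRange 16 (-1) (-1)).foldl
    (fun crc i => bStep crc (PySem.Int.band (val >>> i.toNat) 1)) 0
  (List.range 7).foldl (fun crc _ => bStep crc 1) crc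


-- ===== PRECONDITION & SPEC =====
def Spec_crc7_py (val : Int) (out : Int) : Prop := out = crc7_py_alt val
instance (val : Int) (out : Int) : Decidable (Spec_crc7_py val out) := by unfold Spec_crc7_py; infer_instance

-- ===== CLAIM (what is proved, stated in full; the proofs are below) =====
def Claim_equal_crc7_py : Prop := ∀ (val : Int), Dom_crc7_py val → Spec_crc7_py val (crc7_py val)

-- ===== LEMMAS AND PROOFS =====

-- Nat model of B's register step (stepN) and of feeding the top n bits of v MSB-first
-- (feedN); polN/bitN are A's pol and bit values when n iterations remain

def stepN (crc b : Nat) : Nat :=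
  let t := crc &&& 64
  let c := ((crc <<< 1) &&& 127) ||| b
  if t ≠ 0 then c ^^^ 9 else c

def feedN : Nat → Nat → Nat → Nat
  | 0, _, crc => crc
  | n+1, v, crc => feedN n v (stepN crc (v / 2^n % 2))

-- Nat helpers
theorem h_div_mod_pow (x a b : Nat) : (x % 2^(a+b)) / 2^a = x / 2^a % 2^b := by
  rw [pow_add]
  exact Nat.mod_mul_right_div_self x (2^a) (2^b)

theorem or_small {x b : Nat} (k : Nat) (hx : x % 2^k = 0) (hb : b < 2^k) : x ||| b = x + b := by
  obtain ⟨y, rfl⟩ := Nat.dvd_of_mod_eq_zero hx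
  apply Nat.eq_of_testBit_eq
  intro i
  rw [Nat.testBit_or]
  rcases lt_or_ge i k with h | h
  · rw [Nat.testBit_two_pow_mul_add y hb, Nat.testBit_two_pow_mul]
    simp [Nat.not_le_of_lt h, h]
  · rw [Nat.testBit_two_pow_mul_add y hb, Nat.testBit_two_pow_mul]
    simp [h, Nat.not_lt_of_le h, Nat.testBit_lt_two_pow (lt_of_lt_of_le hb (Nat.pow_le_pow_right (by norm_num) h))]

theorem dn_lemma (y d n : Nat) : ((y ^^^ (d <<< n)) % 2^(n+7)) / 2^n = ((y / 2^n) ^^^ d) % 2^7 := by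
  apply Nat.eq_of_testBit_eq
  intro i
  rw [Nat.testBit_div_two_pow, Nat.testBit_mod_two_pow, Nat.testBit_mod_two_pow,
    Nat.testBit_xor, Nat.testBit_xor, Nat.testBit_shiftLeft, Nat.testBit_div_two_pow]
  have : d.testBit (i + n - n) = d.testBit i := by congr 1; omega
  rw [this]
  by_cases h : i < 7
  · simp [h, show i + n < n + 7 by omega, show i + n ≥ n by omega]
  · simp [h, show ¬ (i + n < n + 7) by omega]

theorem step_small {c b : Nat} (hc : c < 64) (hb : b < 2) : stepN c b = 2*c + b := by
  unfold stepN
  have ht : c &&& 64 = 0 := by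
    have h6 : c.testBit 6 = false := Nat.testBit_lt_two_pow hc
    rw [show (64:Nat) = 2^6 from rfl, Nat.and_two_pow, h6]
    rfl
  have h2 : (c <<< 1) &&& 127 = 2*c := by
    rw [Nat.shiftLeft_eq, show (127:Nat) = 2^7 - 1 from rfl, Nat.and_two_pow_sub_one_eq_mod]
    omega
  rw [ht, h2]
  simp [or_small (x := 2*c) 1 (by omega) hb]

theorem feed_congr (n : Nat) : ∀ (v u crc : Nat), v % 2^n = u % 2^n → feedN n v crc = feedN n u crc := by
  induction n with
  | zero => intro v u crc _; rfl
  | succ n ih =>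
    intro v u crc h
    show feedN n v (stepN crc (v / 2^n % 2)) = feedN n u (stepN crc (u / 2^n % 2))
    have hbit : v / 2^n % 2 = u / 2^n % 2 := by
      have hv := h_div_mod_pow v n 1
      have hu := h_div_mod_pow u n 1
      rw [pow_one] at hv hu
      rw [← hv, ← hu, h]
    rw [hbit]
    apply ih
    have h1 : v % 2^(n+1) % 2^n = v % 2^n := Nat.mod_mod_of_dvd v (pow_dvd_pow 2 (Nat.le_succ n))
    have h2 : u % 2^(n+1) % 2^n = u % 2^n := Nat.mod_mod_of_dvd u (pow_dvd_pow 2 (Nat.le_succ n))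
    rw [← h1, ← h2, h]

theorem div_split (w n : Nat) : w / 2^n = 2*(w / 2^(n+1)) + w / 2^n % 2 := by
  have h1 : w / 2^(n+1) = (w / 2^n) / 2 := by
    rw [Nat.div_div_eq_div_mul, ← pow_succ]
  omega

-- ===== Int-side bridge lemmas =====
theorem pow_cast_int (N : Nat) : (((2^N : Nat)) : Int) = (2:Int)^N := by push_cast; rfl

theorem pos_emod_pow (aN N : Nat) : ((aN:Int)) % ((2:Int)^N) = ((aN % 2^N : Nat) : Int) := by
  push_cast
  rfl

theorem neg_emod_pow (mm N : Nat) :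
    (-((mm:Int)+1)) % ((2:Int)^N) = ((2^N - 1 - mm % 2^N : Nat) : Int) := by
  rw [← pow_cast_int]
  have hd : (2^N : Int) * ((mm/2^N : Nat):Int) + ((mm % 2^N : Nat):Int) = mm := by
    exact_mod_cast Nat.div_add_mod mm (2^N)
  have hm : mm % 2^N < 2^N := Nat.mod_lt _ (Nat.two_pow_pos N)
  have h2 : ((2^N : Nat) : Int) = (2^N : Int) := pow_cast_int N
  have hc : ((2^N - 1 - mm % 2^N : Nat) : Int) = (2^N : Int) - 1 - ((mm % 2^N : Nat) : Int) := by
    omega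
  have key : (-((mm:Int)+1)) = ((2^N : Nat) : Int) * (-((mm/2^N : Nat):Int) - 1) + ((2^N - 1 - mm % 2^N : Nat) : Int) := by
    rw [hc, h2]
    linarith [hd]
  rw [key, add_comm, Int.add_mul_emod_self_left, Int.emod_eq_of_lt (by positivity) (by omega)]

theorem emod_pow_toNat_lt (a : Int) (N : Nat) : (a % ((2:Int)^N)).toNat < 2^N := by
  have h1 : a % ((2:Int)^N) < 2^N := Int.emod_lt_of_pos a (by positivity)
  have h2 : 0 ≤ a % ((2:Int)^N) := Int.emod_nonneg a (by positivity)
  have h3 : ((2^N : Nat) : Int) = (2:Int)^N := pow_cast_int N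
  omega

theorem emod_toNat_cast (a : Int) (N : Nat) :
    (((a % ((2:Int)^N)).toNat : Nat) : Int) = a % ((2:Int)^N) :=
  Int.toNat_of_nonneg (Int.emod_nonneg a (by positivity))

-- complement below width M
theorem comp_xor (x M : Nat) (h : x < 2^M) : x ^^^ (2^M - 1) = 2^M - 1 - x := by
  induction M generalizing x with
  | zero => interval_cases x; rfl
  | succ M ih =>
    have hx2 : x / 2 < 2^M := by omega
    have hdiv : (x ^^^ (2^(M+1) - 1)) / 2 = (x/2) ^^^ (2^M - 1) := by
      have h0 : (x ^^^ (2^(M+1) - 1)) / 2 = x/2 ^^^ (2^(M+1)-1)/2 := by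
        apply Nat.eq_of_testBit_eq
        intro i
        rw [Nat.testBit_div_two, Nat.testBit_xor, Nat.testBit_xor, Nat.testBit_div_two, Nat.testBit_div_two]
      rw [h0]
      congr 1
      omega
    have hmod : (x ^^^ (2^(M+1) - 1)) % 2 = 1 - x % 2 := by
      have h0 : (x ^^^ (2^(M+1)-1)) % 2 = x % 2 ^^^ (2^(M+1)-1) % 2 := by
        have := @Nat.xor_mod_two_pow x (2^(M+1)-1) 1
        simpa using this
      have h1 : (2^(M+1)-1) % 2 = 1 := by
        have : 2^(M+1) % 2 = 0 := by
          simp [pow_succ, Nat.mul_mod_left]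
        omega
      rw [h0, h1]
      rcases Nat.mod_two_eq_zero_or_one x with h | h <;> (rw [h]; rfl)
    have := ih (x/2) hx2
    have hval := Nat.div_add_mod (x ^^^ (2^(M+1)-1)) 2
    rw [hdiv, this] at hval
    rw [hmod] at hval
    have hx : x % 2 < 2 := Nat.mod_lt _ (by norm_num)
    have hxd := Nat.div_add_mod x 2
    omega

theorem xor_mod_helper (x c M : Nat) : (x ^^^ c) % 2^M = ((x % 2^M) ^^^ c) % 2^M := by
  rw [Nat.xor_mod_two_pow, @Nat.xor_mod_two_pow (x % 2^M) c M, Nat.mod_mod_of_dvd _ dvd_rfl]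

theorem xor_comp_helper (x c M : Nat) (hx : x < 2^M) :
    ((x ^^^ (2^M - 1)) ^^^ c) % 2^M = 2^M - 1 - (x ^^^ (c % 2^M)) := by
  have hK : (2:Nat)^M - 1 < 2^M := by have := Nat.two_pow_pos M; omega
  have h1 : ((x ^^^ (2^M - 1)) ^^^ c) % 2^M = ((x ^^^ (2^M - 1)) % 2^M) ^^^ (c % 2^M) := Nat.xor_mod_two_pow
  have h2 : (x ^^^ (2^M - 1)) % 2^M = x ^^^ (2^M - 1) := Nat.mod_eq_of_lt (Nat.xor_lt_two_pow hx hK)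
  have h3 : (x ^^^ (2^M - 1)) ^^^ (c % 2^M) = (x ^^^ (c % 2^M)) ^^^ (2^M - 1) := by
    rw [Nat.xor_assoc, Nat.xor_assoc]
    congr 1
    exact Nat.xor_comm _ _
  have hxc : x ^^^ (c % 2^M) < 2^M := Nat.xor_lt_two_pow hx (Nat.mod_lt _ (Nat.two_pow_pos _))
  rw [h1, h2, h3, comp_xor _ M hxc]

-- `a & 2^m` in terms of the two's-complement bit of a
theorem band_two_pow_int (a : Int) (m : Nat) :
    PySem.Int.band a ((2^m : Nat) : Int) = ((2^m * ((a % (2:Int)^(m+1)).toNat / 2^m) : Nat) : Int) := by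
  unfold PySem.Int.band
  by_cases ha : 0 ≤ a
  · rw [if_pos ha, if_pos (by positivity)]
    obtain ⟨aN, rfl⟩ := Int.eq_ofNat_of_zero_le ha
    rw [pos_emod_pow aN (m+1)]
    simp only [Int.toNat_natCast]
    have h1 : (aN % 2^(m+1)) / 2^m = aN / 2^m % 2 := by
      have := h_div_mod_pow aN m 1
      rwa [pow_one] at this
    rw [h1, Nat.and_two_pow, Nat.testBit_eq_decide_div_mod_eq]
    rcases Nat.mod_two_eq_zero_or_one (aN / 2^m) with h | h <;> simp [h]
  · rw [if_neg ha, if_pos (by positivity)]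
    set mm := (-a - 1).toNat with hmm
    have ha' : a = -((mm:Int)+1) := by simp only [hmm]; omega
    rw [ha', neg_emod_pow mm (m+1)]
    simp only [Int.toNat_natCast]
    have hr : mm % 2^(m+1) < 2^(m+1) := Nat.mod_lt _ (Nat.two_pow_pos _)
    have hr1 : mm % 2^(m+1) / 2^m = mm / 2^m % 2 := by
      have := h_div_mod_pow mm m 1
      rwa [pow_one] at this
    have hpow : (2:Nat)^(m+1) = 2 * 2^m := by ring
    have hL : (2^(m+1) - 1 - mm % 2^(m+1)) / 2^m = 1 - mm / 2^m % 2 := by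
      rcases Nat.lt_or_ge (mm % 2^(m+1)) (2^m) with h | h
      · have h0 : mm / 2^m % 2 = 0 := by rw [← hr1]; exact Nat.div_eq_of_lt h
        rw [h0]
        apply Nat.div_eq_of_lt_le (by omega) (by omega)
      · have h0 : mm / 2^m % 2 = 1 := by
          rw [← hr1]
          apply Nat.div_eq_of_lt_le (by omega) (by omega)
        rw [h0]
        apply Nat.div_eq_of_lt
        omega
    rw [hL, Nat.and_comm, Nat.and_two_pow, Nat.testBit_eq_decide_div_mod_eq]
    rcases Nat.mod_two_eq_zero_or_one (mm / 2^m) with h | h <;> simp [h]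

-- `a & 127` is `a mod 128`
theorem band_mask_int (a : Int) : PySem.Int.band a 127 = a % 128 := by
  have h128 : (128:Int) = (2:Int)^7 := by norm_num
  unfold PySem.Int.band
  by_cases ha : 0 ≤ a
  · rw [if_pos ha, if_pos (by norm_num)]
    obtain ⟨aN, rfl⟩ := Int.eq_ofNat_of_zero_le ha
    rw [h128, pos_emod_pow aN 7]
    simp only [Int.toNat_natCast]
    rw [show ((127:Int)).toNat = 127 from rfl, show (127:Nat) = 2^7 - 1 from rfl,
      Nat.and_two_pow_sub_one_eq_mod]
  · rw [if_neg ha, if_pos (by norm_num)]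
    set mm := (-a - 1).toNat with hmm
    have ha' : a = -((mm:Int)+1) := by simp only [hmm]; omega
    rw [ha', h128, neg_emod_pow mm 7]
    rw [show ((127:Int)).toNat = 127 from rfl, Nat.and_comm, show (127:Nat) = 2^7 - 1 from rfl,
      Nat.and_two_pow_sub_one_eq_mod]

-- xor with a nonnegative constant, mod 2^M
theorem bxor_emod_int (a : Int) (c M : Nat) :
    (PySem.Int.bxor a ((c : Nat) : Int)) % ((2:Int)^M) =
      ((((a % (2:Int)^M).toNat ^^^ c) % 2^M : Nat) : Int) := by
  unfold PySem.Int.bxor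
  by_cases ha : 0 ≤ a
  · rw [if_pos ha, if_pos (by positivity)]
    obtain ⟨aN, rfl⟩ := Int.eq_ofNat_of_zero_le ha
    simp only [Int.toNat_natCast]
    rw [pos_emod_pow (aN ^^^ c) M, pos_emod_pow aN M]
    simp only [Int.toNat_natCast]
    rw [← xor_mod_helper]
  · rw [if_neg ha, if_pos (by positivity)]
    set mm := (-a - 1).toNat with hmm
    have ha' : a = -((mm:Int)+1) := by simp only [hmm]; omega
    simp only [Int.toNat_natCast]
    have hstep : (-(((mm ^^^ c : Nat) : Int)) - 1) % (2:Int)^M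
        = ((2^M - 1 - (mm ^^^ c) % 2^M : Nat) : Int) := by
      rw [show (-(((mm ^^^ c : Nat) : Int)) - 1) = -(((mm ^^^ c : Nat) : Int) + 1) from by ring]
      exact neg_emod_pow (mm ^^^ c) M
    rw [hstep, ha', neg_emod_pow mm M]
    simp only [Int.toNat_natCast]
    have hx : mm % 2^M < 2^M := Nat.mod_lt _ (Nat.two_pow_pos _)
    congr 1
    conv_lhs => rw [Nat.xor_mod_two_pow]
    rw [show (2:Nat)^M - 1 - mm % 2^M = (mm % 2^M) ^^^ (2^M - 1) from (comp_xor _ M hx).symm,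
      xor_comp_helper _ c M hx]

-- `(a*128) | 127 = a*128 + 127`
theorem bor_mul128 (a : Int) : PySem.Int.bor (a * 128) 127 = a * 128 + 127 := by
  unfold PySem.Int.bor
  by_cases ha : 0 ≤ a
  · rw [if_pos (by linarith), if_pos (by norm_num)]
    obtain ⟨aN, rfl⟩ := Int.eq_ofNat_of_zero_le ha
    rw [show ((aN:Int) * 128) = (((aN * 128 : Nat)) : Int) from by push_cast; ring]
    simp only [Int.toNat_natCast]
    rw [show ((127:Int)).toNat = 127 from rfl,
      or_small (x := aN * 128) 7 (by omega) (by norm_num)]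
    push_cast
    ring
  · have ha1 : a ≤ -1 := by omega
    rw [if_neg (by nlinarith), if_pos (by norm_num)]
    set mm := (-(a*128) - 1).toNat with hmm
    set k := (-a - 1).toNat with hk
    have hkk : (k:Int) = -a - 1 := by simp only [hk]; omega
    have hmk : mm = 128 * k + 127 := by
      have hmmi : (mm : Int) = -(a*128) - 1 := by
        simp only [hmm]
        rw [Int.toNat_of_nonneg (by nlinarith)]
      have h2 : (-(a*128) - 1 : Int) = 128 * (-a-1) + 127 := by ring
      omega
    have hand : mm &&& ((127:Int)).toNat = 127 := by
      rw [show ((127:Int)).toNat = 127 from rfl, show (127:Nat) = 2^7 - 1 from rfl,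
        Nat.and_two_pow_sub_one_eq_mod, hmk]
      omega
    rw [hand, hmk]
    have : ((128 * k + 127 - 127 : Nat) : Int) = 128 * (k:Int) := by push_cast; ring
    rw [this]
    rw [hkk]
    ring

def polN : Nat → Nat
  | 0 => 68
  | n+1 => 137 * 2^n

def bitN : Nat → Nat
  | 0 => 0
  | n+1 => 2^n

-- the two's-complement bit `(a >> i) & 1`
theorem bit_extract (a : Int) (i : Nat) :
    PySem.Int.band (a / ((2:Int)^i)) 1 = (((a % ((2:Int)^(i+1))).toNat / 2^i : Nat) : Int) := by
  rw [PySem.Int.band_one]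
  show (a / ((2:Int)^i)).fmod 2 = _
  rw [Int.fmod_eq_emod]
  simp only [show (0:Int) ≤ 2 from by norm_num, true_or, if_pos, add_zero]
  have hpos : (0:Int) < 2^(i+1) := by positivity
  set r := a % ((2:Int)^(i+1)) with hr
  have hge : 0 ≤ r := Int.emod_nonneg a (by positivity)
  have hlt : r < 2^(i+1) := Int.emod_lt_of_pos a hpos
  have hqr : a = 2^(i+1) * (a / 2^(i+1)) + r := (Int.ediv_add_emod a _).symm
  have key : a / 2^i = r / 2^i + 2 * (a / 2^(i+1)) := by
    conv_lhs => rw [hqr]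
    rw [show ((2:Int)^(i+1)) * (a / 2^(i+1)) + r = r + (2 * (a / 2^(i+1))) * 2^i from by ring]
    rw [Int.add_mul_ediv_right _ _ (by positivity)]
  rw [key, Int.add_mul_emod_self_left]
  have h01 : r / 2^i = ((r.toNat / 2^i : Nat) : Int) := by
    rw [show r = ((r.toNat : Nat) : Int) from (Int.toNat_of_nonneg hge).symm]
    exact_mod_cast rfl
  rw [h01]
  have hlt2 : r.toNat / 2^i < 2 := by
    have h1 : r.toNat < 2^(i+1) := by
      have := pow_cast_int (i+1)
      omega
    rw [Nat.div_lt_iff_lt_mul (Nat.two_pow_pos i)]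
    have h2 : (2:Nat)^(i+1) = 2^i * 2 := by ring
    omega
  rw [Int.emod_eq_of_lt (by positivity) (by exact_mod_cast hlt2)]

-- casts for the halving of pol and bit
theorem pol_shift (n : Nat) : (((137 * 2^n : Nat) : Int)) >>> (1:Nat) = ((polN n : Nat) : Int) := by
  rw [Int.shiftRight_eq_div_pow]
  cases n with
  | zero => rfl
  | succ m =>
    show (((137 * 2^(m+1) : Nat) : Int)) / ((2^1 : Nat) : Int) = ((137 * 2^m : Nat) : Int)
    rw [show (137 * 2^(m+1) : Nat) = (137 * 2^m) * 2 from by ring]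
    push_cast
    omega

theorem bit_shift (n : Nat) : (((2^n : Nat) : Int)) >>> (1:Nat) = ((bitN n : Nat) : Int) := by
  rw [Int.shiftRight_eq_div_pow]
  cases n with
  | zero => rfl
  | succ m =>
    show (((2^(m+1) : Nat) : Int)) / ((2^1 : Nat) : Int) = ((2^m : Nat) : Int)
    rw [show (2^(m+1) : Nat) = 2^m * 2 from by ring]
    push_cast
    omega

-- B's register step on nonnegative values is the Nat model
theorem bStep_cast (c b : Nat) : bStep ((c:Nat):Int) ((b:Nat):Int) = ((stepN c b : Nat) : Int) := by
  unfold bStep stepN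
  simp only [show (0x40 : Int) = ((64 : Nat) : Int) from rfl,
    show (0x7F : Int) = ((127 : Nat) : Int) from rfl,
    show (0x09 : Int) = ((9 : Nat) : Int) from rfl,
    show ((c:Int) <<< (1:Nat)) = (((c <<< 1 : Nat)) : Int) from by
      rw [Int.shiftLeft_eq, Nat.shiftLeft_eq]; push_cast; ring,
    PySem.Int.band_natCast, PySem.Int.bor_natCast, PySem.Int.bxor_natCast,
    ne_eq, Nat.cast_eq_zero]
  by_cases h : c &&& 64 = 0 <;> simp [h]

theorem main_loop (n : Nat) : ∀ v : Int,
    (crc7Loop n v ((polN n : Nat) : Int) ((bitN n : Nat) : Int)) % ((2:Int)^7) =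
      ((feedN n ((v % ((2:Int)^(n+7))).toNat) (((v % ((2:Int)^(n+7))).toNat) / 2^n) : Nat) : Int) := by
  induction n with
  | zero =>
    intro v
    show v % ((2:Int)^7) = ((((v % ((2:Int)^7)).toNat) / 2^0 : Nat) : Int)
    rw [pow_zero, Nat.div_one, emod_toNat_cast]
  | succ n ih =>
    intro v
    simp only [polN, bitN, crc7Loop]
    have hbit1 : (1:Int) ≤ ((2^n : Nat) : Int) := by exact_mod_cast Nat.one_le_two_pow
    rw [if_pos hbit1]
    have hmask : (((2^n : Nat) : Int) <<< (7:Nat)) = ((2^(n+7) : Nat) : Int) := by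
      rw [Int.shiftLeft_eq]
      push_cast
      ring
    rw [hmask, band_two_pow_int v (n+7), pol_shift n, bit_shift n]
    rw [show (n+1)+7 = (n+7)+1 from rfl]
    set w := (v % ((2:Int)^(n+7+1))).toNat with hw
    have hwlt : w < 2^(n+7+1) := emod_pow_toNat_lt v (n+7+1)
    have hdlt : w / 2^(n+7) < 2 := by
      rw [Nat.div_lt_iff_lt_mul (Nat.two_pow_pos _)]
      have : (2:Nat)^(n+7+1) = 2^(n+7) * 2 := by ring
      omega
    -- u : the low n+7 bits of v
    have hu : (v % ((2:Int)^(n+7))).toNat = w % 2^(n+7) := by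
      have h1 : v % ((2:Int)^(n+7)) = (v % ((2:Int)^(n+7+1))) % ((2:Int)^(n+7)) :=
        (Int.emod_emod_of_dvd v (by rw [pow_succ]; exact Dvd.intro 2 (by ring))).symm
      have h2 : (v % ((2:Int)^(n+7+1))) = ((w : Nat) : Int) := (Int.toNat_of_nonneg (Int.emod_nonneg v (by positivity))).symm
      rw [h1, h2, pos_emod_pow w (n+7), Int.toNat_natCast]
    have hcq : w / 2^(n+1) < 2^7 := by
      rw [Nat.div_lt_iff_lt_mul (Nat.two_pow_pos _)]
      have : (2:Nat)^(n+7+1) = 2^7 * 2^(n+1) := by ring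
      omega
    have hb2 : w / 2^n % 2 < 2 := Nat.mod_lt _ (by norm_num)
    rcases Nat.le_one_iff_eq_zero_or_eq_one.mp (Nat.lt_succ_iff.mp hdlt) with hd0 | hd1
    · -- bit n+7 of v is clear: no xor
      rw [if_neg (by rw [hd0]; simp)]
      rw [ih v, hu]
      have hwsmall : w < 2^(n+7) := (Nat.div_eq_zero_iff_lt (Nat.two_pow_pos _)).mp hd0
      have hww : w % 2^(n+7) = w := Nat.mod_eq_of_lt hwsmall
      rw [hww]
      have hsm : w / 2^(n+1) < 64 := by
        rw [Nat.div_lt_iff_lt_mul (Nat.two_pow_pos _)]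
        have h64 : (64:Nat) * 2^(n+1) = 2^(n+7) := by ring
        omega
      conv_rhs => rw [show feedN (n+1) w (w / 2^(n+1)) = feedN n w (stepN (w / 2^(n+1)) (w / 2^n % 2)) from rfl]
      rw [step_small hsm hb2, ← div_split]
    · -- bit n+7 of v is set: xor with the polynomial
      rw [if_pos (by
        rw [hd1]
        simp only [mul_one, ne_eq, Nat.cast_eq_zero]
        positivity)]
      rw [ih (PySem.Int.bxor v ((137 * 2^n : Nat) : Int))]
      have hxe : ((PySem.Int.bxor v ((137 * 2^n : Nat) : Int)) % ((2:Int)^(n+7))).toNat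
          = ((w % 2^(n+7)) ^^^ (137 <<< n)) % 2^(n+7) := by
        rw [bxor_emod_int v (137 * 2^n) (n+7), Int.toNat_natCast, hu, ← Nat.shiftLeft_eq]
      rw [hxe]
      set y := w % 2^(n+7) with hy
      set y' := (y ^^^ (137 <<< n)) % 2^(n+7) with hy'
      -- the register step equals the new state's bits above n
      have hd1' : w / 2^n / 2^7 = 1 := by
        rw [Nat.div_div_eq_div_mul, ← pow_add]
        exact hd1
      have hstep : stepN (w / 2^(n+1)) (w / 2^n % 2) = y' / 2^n := by
        rw [hy', dn_lemma y 137 n]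
        have hyd : y / 2^n = w / 2^n % 2^7 := by rw [hy]; exact h_div_mod_pow w n 7
        rw [hyd, Nat.xor_mod_two_pow]
        have h137 : (137:Nat) % 2^7 = 9 := by norm_num
        rw [h137, Nat.mod_mod_of_dvd _ dvd_rfl]
        -- now compute stepN on the triggered branch
        unfold stepN
        have htop : w / 2^(n+1) &&& 64 ≠ 0 := by
          rw [show (64:Nat) = 2^6 from rfl, Nat.and_two_pow, Nat.testBit_eq_decide_div_mod_eq]
          have hdd : w / 2^(n+1) / 2^6 = w / 2^(n+7) := by
            rw [Nat.div_div_eq_div_mul, ← pow_add]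
          rw [hdd, hd1]
          norm_num
        simp only [htop, ne_eq, not_false_iff, if_pos]
        have hsl : (w / 2^(n+1)) <<< 1 &&& 127 = 2 * (w / 2^(n+1)) % 128 := by
          rw [Nat.shiftLeft_eq, show (127:Nat) = 2^7 - 1 from rfl, Nat.and_two_pow_sub_one_eq_mod]
          ring_nf
        rw [hsl, or_small (x := 2 * (w / 2^(n+1)) % 128) 1 (by omega) (by omega)]
        congr 1
        have hds := div_split w n
        have h128 : (2:Nat)^7 = 128 := by norm_num
        have hx7 : w / 2^n % 2^7 = w / 2^n - 128 := by
          have := Nat.div_add_mod (w / 2^n) (2^7)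
          omega
        omega
      -- the fed low bits agree
      have hcongr : feedN n w (y' / 2^n) = feedN n y' (y' / 2^n) := by
        apply feed_congr
        rw [hy', Nat.mod_mod_of_dvd _ (pow_dvd_pow 2 (by omega)), Nat.xor_mod_two_pow,
          Nat.shiftLeft_eq, Nat.mul_mod_left, Nat.xor_zero, hy,
          Nat.mod_mod_of_dvd _ (pow_dvd_pow 2 (by omega))]
      conv_rhs => rw [show feedN (n+1) w (w / 2^(n+1)) = feedN n w (stepN (w / 2^(n+1)) (w / 2^n % 2)) from rfl]
      rw [hstep, hcongr]
theorem load (V : Nat) (hV : V < 2^24) : feedN 24 V 0 = feedN 17 V (V / 2^17) := by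
  have hVd : V < 16777216 := by omega
  show feedN 23 V (stepN 0 (V / 2^23 % 2)) = feedN 17 V (V / 2^17)
  rw [show stepN 0 (V / 2^23 % 2) = V / 2^23 from by rw [step_small (by omega) (by omega)]; omega]
  show feedN 22 V (stepN (V / 2^23) (V / 2^22 % 2)) = feedN 17 V (V / 2^17)
  rw [show stepN (V / 2^23) (V / 2^22 % 2) = V / 2^22 from by rw [step_small (by omega) (by omega)]; omega]
  show feedN 21 V (stepN (V / 2^22) (V / 2^21 % 2)) = feedN 17 V (V / 2^17)
  rw [show stepN (V / 2^22) (V / 2^21 % 2) = V / 2^21 from by rw [step_small (by omega) (by omega)]; omega]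
  show feedN 20 V (stepN (V / 2^21) (V / 2^20 % 2)) = feedN 17 V (V / 2^17)
  rw [show stepN (V / 2^21) (V / 2^20 % 2) = V / 2^20 from by rw [step_small (by omega) (by omega)]; omega]
  show feedN 19 V (stepN (V / 2^20) (V / 2^19 % 2)) = feedN 17 V (V / 2^17)
  rw [show stepN (V / 2^20) (V / 2^19 % 2) = V / 2^19 from by rw [step_small (by omega) (by omega)]; omega]
  show feedN 18 V (stepN (V / 2^19) (V / 2^18 % 2)) = feedN 17 V (V / 2^17)
  rw [show stepN (V / 2^19) (V / 2^18 % 2) = V / 2^18 from by rw [step_small (by omega) (by omega)]; omega]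
  show feedN 17 V (stepN (V / 2^18) (V / 2^17 % 2)) = feedN 17 V (V / 2^17)
  rw [show stepN (V / 2^18) (V / 2^17 % 2) = V / 2^17 from by rw [step_small (by omega) (by omega)]; omega]


theorem crc7_py_eq_feed (val : Int) :
    crc7_py val =
      ((feedN 17 (((val % ((2:Int)^17)).toNat) * 128 + 127)
        ((((val % ((2:Int)^17)).toNat) * 128 + 127) / 2^17) : Nat) : Int) := by
  unfold crc7_py
  show PySem.Int.band
      (crc7Loop 17 (PySem.Int.bor (val <<< (7:Nat)) 0x7F) (((0x89:Int) <<< (17-7-1:Nat)) <<< (7:Nat))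
        ((1:Int) <<< (17-1:Nat)))
      (((1:Int) <<< (7:Nat)) - 1) = _
  rw [show (((0x89:Int) <<< (17-7-1:Nat)) <<< (7:Nat)) = ((polN 17 : Nat) : Int) from by decide,
    show ((1:Int) <<< (17-1:Nat)) = ((bitN 17 : Nat) : Int) from by decide,
    show (((1:Int) <<< (7:Nat)) - 1) = (127:Int) from by decide,
    show (val <<< (7:Nat)) = val * 128 from by rw [Int.shiftLeft_eq]; norm_num,
    show (0x7F : Int) = 127 from rfl, bor_mul128, band_mask_int]
  have hml := main_loop 17 (val * 128 + 127)
  rw [show ((2:Int)^7) = (128:Int) from by norm_num] at hml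
  rw [hml]
  have hr0 : 0 ≤ val % ((2:Int)^17) := Int.emod_nonneg val (by positivity)
  have hr1 : val % ((2:Int)^17) < 2^17 := Int.emod_lt_of_pos val (by positivity)
  have hV : ((val*128+127) % ((2:Int)^(17+7))) = (val % ((2:Int)^17)) * 128 + 127 := by
    have hsplit : val*128 + 127 = (val % ((2:Int)^17))*128 + 127 + ((2:Int)^(17+7)) * (val / 2^17) := by
      omega
    rw [hsplit, Int.add_mul_emod_self_left,
      Int.emod_eq_of_lt (by omega) (by omega)]
  rw [hV]
  have ht : ((val % ((2:Int)^17)) * 128 + 127).toNat = (val % ((2:Int)^17)).toNat * 128 + 127 := by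
    omega
  rw [ht]

theorem bit_of_m (a : Int) (i : Nat) (h : i + 1 ≤ 17) :
    PySem.Int.band (a / ((2:Int)^i)) 1 = (((a % ((2:Int)^17)).toNat / 2^i % 2 : Nat) : Int) := by
  rw [bit_extract a i]
  congr 1
  have h1 : a % ((2:Int)^(i+1)) = (a % ((2:Int)^17)) % ((2:Int)^(i+1)) :=
    (Int.emod_emod_of_dvd a (pow_dvd_pow 2 h)).symm
  have h2 : (a % ((2:Int)^17)) = (((a % ((2:Int)^17)).toNat : Nat) : Int) :=
    (Int.toNat_of_nonneg (Int.emod_nonneg a (by positivity))).symm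
  rw [h1, h2, pos_emod_pow, Int.toNat_natCast]
  have h3 := h_div_mod_pow ((a % ((2:Int)^17)).toNat) i 1
  rw [pow_one] at h3
  rw [h3, Int.toNat_natCast]

theorem bStep_cast0 (b : Nat) : bStep (0:Int) ((b:Nat):Int) = ((stepN 0 b : Nat) : Int) := by
  have := bStep_cast 0 b
  simpa using this

theorem bStep_cast1 (c : Nat) : bStep ((c:Nat):Int) (1:Int) = ((stepN c 1 : Nat) : Int) := by
  have := bStep_cast c 1
  simpa using this

theorem alt_eq (val : Int) :
    crc7_py_alt val = ((feedN 24 ((val % ((2:Int)^17)).toNat * 128 + 127) 0 : Nat) : Int) := by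
  unfold crc7_py_alt
  rw [show PySem.List.pyRange 16 (-1) (-1) = [16,15,14,13,12,11,10,9,8,7,6,5,4,3,2,1,0] from by decide,
    show List.range 7 = [0,1,2,3,4,5,6] from by decide]
  simp only [List.foldl]
  simp only [show (((16:Int)).toNat) = 16 from rfl, show (((15:Int)).toNat) = 15 from rfl, show (((14:Int)).toNat) = 14 from rfl, show (((13:Int)).toNat) = 13 from rfl, show (((12:Int)).toNat) = 12 from rfl, show (((11:Int)).toNat) = 11 from rfl, show (((10:Int)).toNat) = 10 from rfl, show (((9:Int)).toNat) = 9 from rfl, show (((8:Int)).toNat) = 8 from rfl, show (((7:Int)).toNat) = 7 from rfl, show (((6:Int)).toNat) = 6 from rfl, show (((5:Int)).toNat) = 5 from rfl, show (((4:Int)).toNat) = 4 from rfl, show (((3:Int)).toNat) = 3 from rfl, show (((2:Int)).toNat) = 2 from rfl, Int.toNat_one, Int.toNat_zero]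
  simp only [Int.shiftRight_natCast_right]
  simp only [Int.shiftRight_eq_div_pow]
  simp only [Nat.cast_pow, Nat.cast_ofNat]
  rw [bit_of_m val 16 (by omega), bit_of_m val 15 (by omega), bit_of_m val 14 (by omega), bit_of_m val 13 (by omega), bit_of_m val 12 (by omega), bit_of_m val 11 (by omega), bit_of_m val 10 (by omega), bit_of_m val 9 (by omega), bit_of_m val 8 (by omega), bit_of_m val 7 (by omega), bit_of_m val 6 (by omega), bit_of_m val 5 (by omega), bit_of_m val 4 (by omega), bit_of_m val 3 (by omega), bit_of_m val 2 (by omega), bit_of_m val 1 (by omega), bit_of_m val 0 (by omega)]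
  simp only [bStep_cast0, bStep_cast, bStep_cast1]
  apply congrArg
  conv_rhs => rw [show feedN 24 (((val % ((2:Int)^17)).toNat) * 128 + 127) 0 = (stepN (stepN (stepN (stepN (stepN (stepN (stepN (stepN (stepN (stepN (stepN (stepN (stepN (stepN (stepN (stepN (stepN (stepN (stepN (stepN (stepN (stepN (stepN (stepN 0 ((((val % ((2:Int)^17)).toNat) * 128 + 127) / 2^23 % 2)) ((((val % ((2:Int)^17)).toNat) * 128 + 127) / 2^22 % 2)) ((((val % ((2:Int)^17)).toNat) * 128 + 127) / 2^21 % 2)) ((((val % ((2:Int)^17)).toNat) * 128 + 127) / 2^20 % 2)) ((((val % ((2:Int)^17)).toNat) * 128 + 127) / 2^19 % 2)) ((((val % ((2:Int)^17)).toNat) * 128 + 127) / 2^18 % 2)) ((((val % ((2:Int)^17)).toNat) * 128 + 127) / 2^17 % 2)) ((((val % ((2:Int)^17)).toNat) * 128 + 127) / 2^16 % 2)) ((((val % ((2:Int)^17)).toNat) * 128 + 127) / 2^15 % 2)) ((((val % ((2:Int)^17)).toNat) * 128 + 127) / 2^14 % 2)) ((((val % ((2:Int)^17)).toNat) * 128 +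 127) / 2^13 % 2)) ((((val % ((2:Int)^17)).toNat) * 128 + 127) / 2^12 % 2)) ((((val % ((2:Int)^17)).toNat) * 128 + 127) / 2^11 % 2)) ((((val % ((2:Int)^17)).toNat) * 128 + 127) / 2^10 % 2)) ((((val % ((2:Int)^17)).toNat) * 128 + 127) / 2^9 % 2)) ((((val % ((2:Int)^17)).toNat) * 128 + 127) / 2^8 % 2)) ((((val % ((2:Int)^17)).toNat) * 128 + 127) / 2^7 % 2)) ((((val % ((2:Int)^17)).toNat) * 128 + 127) / 2^6 % 2)) ((((val % ((2:Int)^17)).toNat) * 128 + 127) / 2^5 % 2)) ((((val % ((2:Int)^17)).toNat) * 128 + 127) / 2^4 % 2)) ((((val % ((2:Int)^17)).toNat) * 128 + 127) / 2^3 % 2)) ((((val % ((2:Int)^17)).toNat) * 128 + 127) / 2^2 % 2)) ((((val % ((2:Int)^17)).toNat) * 128 + 127) / 2^1 % 2)) ((((val % ((2:Int)^17)).toNat) * 128 + 127) / 2^0 % 2)) from rfl]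
  set m := (val % ((2:Int)^17)).toNat with hm
  rw [show (m * 128 + 127) / 2^23 % 2 = m / 2^16 % 2 from by omega]
  rw [show (m * 128 + 127) / 2^22 % 2 = m / 2^15 % 2 from by omega]
  rw [show (m * 128 + 127) / 2^21 % 2 = m / 2^14 % 2 from by omega]
  rw [show (m * 128 + 127) / 2^20 % 2 = m / 2^13 % 2 from by omega]
  rw [show (m * 128 + 127) / 2^19 % 2 = m / 2^12 % 2 from by omega]
  rw [show (m * 128 + 127) / 2^18 % 2 = m / 2^11 % 2 from by omega]
  rw [show (m * 128 + 127) / 2^17 % 2 = m / 2^10 % 2 from by omega]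
  rw [show (m * 128 + 127) / 2^16 % 2 = m / 2^9 % 2 from by omega]
  rw [show (m * 128 + 127) / 2^15 % 2 = m / 2^8 % 2 from by omega]
  rw [show (m * 128 + 127) / 2^14 % 2 = m / 2^7 % 2 from by omega]
  rw [show (m * 128 + 127) / 2^13 % 2 = m / 2^6 % 2 from by omega]
  rw [show (m * 128 + 127) / 2^12 % 2 = m / 2^5 % 2 from by omega]
  rw [show (m * 128 + 127) / 2^11 % 2 = m / 2^4 % 2 from by omega]
  rw [show (m * 128 + 127) / 2^10 % 2 = m / 2^3 % 2 from by omega]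
  rw [show (m * 128 + 127) / 2^9 % 2 = m / 2^2 % 2 from by omega]
  rw [show (m * 128 + 127) / 2^8 % 2 = m / 2^1 % 2 from by omega]
  rw [show (m * 128 + 127) / 2^7 % 2 = m / 2^0 % 2 from by omega]
  rw [show (m * 128 + 127) / 2^6 % 2 = 1 from by omega]
  rw [show (m * 128 + 127) / 2^5 % 2 = 1 from by omega]
  rw [show (m * 128 + 127) / 2^4 % 2 = 1 from by omega]
  rw [show (m * 128 + 127) / 2^3 % 2 = 1 from by omega]
  rw [show (m * 128 + 127) / 2^2 % 2 = 1 from by omega]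
  rw [show (m * 128 + 127) / 2^1 % 2 = 1 from by omega]
  rw [show (m * 128 + 127) / 2^0 % 2 = 1 from by omega]

theorem final_eq (val : Int) : crc7_py val = crc7_py_alt val := by
  rw [crc7_py_eq_feed val, alt_eq val]
  have hm := emod_pow_toNat_lt val 17
  rw [load _ (by omega)]

-- ===== VERDICT (by name: the statement is the Claim_ definition above) =====
theorem crc7_py_spec : Claim_equal_crc7_py := by
  unfold Claim_equal_crc7_py Spec_crc7_py
  intro val _
  exact final_eq val
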